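-- pv_equiv track=rewrite | github.com/lirmag/All-works | hmwrk 18.06.22/22.py | f
-- ===== SOURCE A (Python) =====
-- def f(x):
--     L = 0
--     M = 0
--     while x > 0:
--         M = M + 1
--         if (x % 2) != 0:
--             L = L + x % 8
--         x = x // 8
--     return L,M
-- ===== SOURCE B (Python) =====
-- def f(x):
--     if x <= 0:
--         return (0, 0)
--     s = oct(x)[2:]
--     return (sum(int(c) for c in s if int(c) % 2 == 1), len(s))
-- ===== Notes on version B (the rewrite author's own statement) =====
-- stated objective: idiomatic
-- what changed: B builds the whole octal digit string with oct() once and then does a single pass summing the odd digits and taking the string length, instead of A's while loop that peels one digit per iteration with floor division and tests the running value's parity inside the loop.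
import Mathlib
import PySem

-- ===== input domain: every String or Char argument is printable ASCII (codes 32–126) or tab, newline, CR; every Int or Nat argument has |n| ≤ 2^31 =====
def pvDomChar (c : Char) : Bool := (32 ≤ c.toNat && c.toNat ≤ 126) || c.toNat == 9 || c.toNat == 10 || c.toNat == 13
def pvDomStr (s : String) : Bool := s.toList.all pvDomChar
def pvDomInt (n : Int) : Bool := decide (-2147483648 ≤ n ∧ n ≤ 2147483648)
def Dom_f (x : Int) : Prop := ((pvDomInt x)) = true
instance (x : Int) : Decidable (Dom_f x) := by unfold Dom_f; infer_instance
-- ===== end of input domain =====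

-- B replaces A's digit-peeling while loop by building the octal digit list first, then one pass; return value only.

-- ===== PORT A =====
-- A: while loop peeling one octal digit per iteration, adding it to L when the running value is odd
def fAux (x L M : Int) : Int × Int :=
  if h : x > 0 then
    fAux (PySem.Int.floordiv x 8)
      (if PySem.Int.mod x 2 ≠ 0 then L + PySem.Int.mod x 8 else L)
      (M + 1)
  else
    (L, M)
termination_by x.toNat
decreasing_by
  have h8 : (0:Int) < 8 := by norm_num
  have := PySem.Int.floordiv_eq_ediv_of_pos (a := x) h8
  omega

def f (x : Int) : Int × Int := fAux x 0 0

-- ===== PORT B =====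
-- octal digits of x, most-significant first (the characters of oct(x)[2:] as ints)
def octDigits (x : Int) : List Int :=
  if _h : x > 0 then
    octDigits (PySem.Int.floordiv x 8) ++ [PySem.Int.mod x 8]
  else
    []
termination_by x.toNat
decreasing_by
  have h8 : (0:Int) < 8 := by norm_num
  have := PySem.Int.floordiv_eq_ediv_of_pos (a := x) h8
  omega

def f_alt (x : Int) : Int × Int :=
  if x ≤ 0 then (0, 0)
  else
    let s := octDigits x
    ((s.filter (fun d => PySem.Int.mod d 2 == 1)).sum, (s.length : Int))

-- ===== PRECONDITION & SPEC =====
def Spec_f (x : Int) (out : Int × Int) : Prop := out = f_alt x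
instance (x : Int) (out : Int × Int) : Decidable (Spec_f x out) := by unfold Spec_f; infer_instance

-- ===== CLAIM (what is proved, stated in full; the proofs are below) =====
def Claim_equal_f : Prop := ∀ (x : Int), Dom_f x → Spec_f x (f x)

-- ===== LEMMAS AND PROOFS =====

lemma fAux_eq (x L M : Int) :
    fAux x L M = (L + ((octDigits x).filter (fun d => PySem.Int.mod d 2 == 1)).sum,
                  M + ((octDigits x).length : Int)) := by
  induction x, L, M using fAux.induct with
  | case1 x L M hx ih =>
      rw [fAux, octDigits]
      simp only [hx, dite_eq_ite]
      simp only [dite_eq_ite] at ih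
      rw [ih]
      simp only [if_true]
      rw [List.filter_append, List.sum_append, List.length_append]
      have hm2 := PySem.Int.mod_eq_emod_of_pos (a := x) (show (0:Int) < 2 by norm_num)
      have hm8 := PySem.Int.mod_eq_emod_of_pos (a := x) (show (0:Int) < 8 by norm_num)
      have hd : PySem.Int.mod (PySem.Int.mod x 8) 2 = PySem.Int.mod x 2 := by
        rw [hm8, hm2, PySem.Int.mod_eq_emod_of_pos (show (0:Int) < 2 by norm_num)]
        omega
      have hfs : (List.filter (fun d => PySem.Int.mod d 2 == 1) [PySem.Int.mod x 8]).sum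
          = if PySem.Int.mod x 2 ≠ 0 then PySem.Int.mod x 8 else 0 := by
        by_cases hodd : PySem.Int.mod x 2 ≠ 0
        · have h1 : PySem.Int.mod x 2 = 1 := by rw [hm2] at hodd ⊢; omega
          simp only [List.filter_cons, List.filter_nil, hd, h1]
          simp
        · have h0 : PySem.Int.mod x 2 = 0 := by omega
          simp only [List.filter_cons, List.filter_nil, hd, h0]
          simp
      rw [hfs]
      refine Prod.ext ?_ ?_
      · show (if PySem.Int.mod x 2 ≠ 0 then L + PySem.Int.mod x 8 else L) + _ = _
        split_ifs <;> simp <;> ring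
      · show M + 1 + _ = M + _
        simp only [List.length_cons, List.length_nil]
        push_cast
        omega
  | case2 x L M hx =>
      rw [fAux, octDigits]
      simp [hx]

-- ===== VERDICT (by name: the statement is the Claim_ definition above) =====
theorem f_spec : Claim_equal_f := by
  intro x _
  show f x = f_alt x
  unfold f f_alt
  rw [fAux_eq]
  by_cases hx : x ≤ 0
  · have : ¬ x > 0 := by omega
    rw [octDigits]
    simp [hx, this]
  · simp [hx]
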